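-- pv_equiv track=rewrite | github.com/ahlinist/cmssw | ElectroWeakAnalysis/MultiBosons/python/tools/JSONFromEDMFile.py | mcranges
-- ===== SOURCE A (Python) =====
-- mcrange = lambda rr: [min([a[0] for a in rr]),max([a[-1] for a in rr])]
--
-- def mcranges(seq,step=1):
--     seq.sort()
--     result=[]
--     for x in seq:
--         if not result or x[0]-result[-1][-1] <= step:
--             result.append(x)
--         else:
--             yield mcrange(result)
--             result =[x]
--     if result:
--         yield mcrange(result)
-- ===== SOURCE B (Python) =====
-- def mcranges(seq, step=1):
--     # streaming aggregates instead of group lists + mcrange rescans;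
--     # like A, sorts seq in place (return-value equivalence is what is proved)
--     seq.sort()
--     opened = False
--     cur_min = cur_max = prev_last = 0
--     for x in seq:
--         first, last = x[0], x[-1]
--         if not opened:
--             cur_min, cur_max, opened = first, last, True
--         elif first - prev_last <= step:
--             if first < cur_min:
--                 cur_min = first
--             if last > cur_max:
--                 cur_max = last
--         else:
--             yield [cur_min, cur_max]
--             cur_min, cur_max = first, last
--         prev_last = last
--     if opened:
--         yield [cur_min, cur_max]
-- ===== Notes on version B (the rewrite author's own statement) =====
-- stated objective: simpler
-- what changed: B replaces A's group-list accumulator plus mcrange's min/max rescan of each finished group by three running scalars (group min of x[0], group max of x[-1], previous x[-1] for the gap test) updated in a single streaming pass.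
import Mathlib
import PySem

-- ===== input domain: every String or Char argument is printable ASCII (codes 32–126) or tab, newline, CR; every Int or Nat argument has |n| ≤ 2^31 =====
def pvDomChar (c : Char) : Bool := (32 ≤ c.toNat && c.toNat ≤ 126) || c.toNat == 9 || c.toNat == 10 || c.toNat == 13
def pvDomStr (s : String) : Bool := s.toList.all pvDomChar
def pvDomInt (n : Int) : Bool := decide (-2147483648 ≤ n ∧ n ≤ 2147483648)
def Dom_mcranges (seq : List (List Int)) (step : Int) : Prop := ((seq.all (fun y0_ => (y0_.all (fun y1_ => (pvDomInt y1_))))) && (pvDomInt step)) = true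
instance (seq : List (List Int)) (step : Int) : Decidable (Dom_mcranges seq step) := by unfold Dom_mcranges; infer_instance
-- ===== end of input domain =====

-- B replaces the group-list accumulator + per-group min/max rescan by three running
-- scalars updated in one streaming pass (objective: simpler). Both Pythons sort seq in
-- place; the equivalence proved here is about the returned (yielded) values.

-- x[0] / x[-1]; the default 0 is unreachable under Pre_ (no empty inner list)
def pvFirst (x : List Int) : Int := (PySem.List.pyGet? x 0).getD 0
def pvLast (x : List Int) : Int := (PySem.List.pyGet? x (-1)).getD 0

-- ===== PORT A =====
-- mcrange = lambda rr: [min([a[0] for a in rr]), max([a[-1] for a in rr])]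
def mcrange (rr : List (List Int)) : List Int :=
  [(PySem.List.min? (rr.map (fun a => pvFirst a)) (fun y => y)).getD 0,
   (PySem.List.max? (rr.map (fun a => pvLast a)) (fun y => y)).getD 0]

def mcrangesLoop (step : Int) : List (List Int) → List (List Int) → List (List Int) → List (List Int)
  | [], result, out => if result.isEmpty then out else out ++ [mcrange result]
  | x :: rest, result, out =>
    if result.isEmpty || decide (pvFirst x - pvLast ((PySem.List.pyGet? result (-1)).getD []) ≤ step) then
      mcrangesLoop step rest (result ++ [x]) out
    else
      mcrangesLoop step rest [x] (out ++ [mcrange result])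

def mcranges (seq : List (List Int)) (step : Int) : List (List Int) :=
  mcrangesLoop step (PySem.List.sorted seq (fun y => y) false) [] []

-- ===== PORT B =====
def mcrangesAltLoop (step : Int) : List (List Int) → Bool → Int → Int → Int → List (List Int) → List (List Int)
  | [], opened, cmin, cmax, _, out => if opened then out ++ [[cmin, cmax]] else out
  | x :: rest, opened, cmin, cmax, prev, out =>
    let first := pvFirst x
    let last := pvLast x
    if !opened then
      mcrangesAltLoop step rest true first last last out
    else if first - prev ≤ step then
      mcrangesAltLoop step rest true (if first < cmin then first else cmin)
        (if last > cmax then last else cmax) last out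
    else
      mcrangesAltLoop step rest true first last last (out ++ [[cmin, cmax]])

def mcranges_alt (seq : List (List Int)) (step : Int) : List (List Int) :=
  mcrangesAltLoop step (PySem.List.sorted seq (fun y => y) false) false 0 0 0 []

-- ===== PRECONDITION & SPEC =====
-- Pre_ excludes sequences containing an empty inner list: there Python A raises IndexError on x[0].
def Pre_mcranges (seq : List (List Int)) (step : Int) : Prop := ∀ x ∈ seq, x ≠ []
instance (seq : List (List Int)) (step : Int) : Decidable (Pre_mcranges seq step) := by unfold Pre_mcranges; infer_instance
def pvWitness_mcranges : List (List Int) × Int := ([[1, 2], [4, 5], [3, 3]], 1)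

def Spec_mcranges (seq : List (List Int)) (step : Int) (out : List (List Int)) : Prop := out = mcranges_alt seq step
instance (seq : List (List Int)) (step : Int) (out : List (List Int)) : Decidable (Spec_mcranges seq step out) := by unfold Spec_mcranges; infer_instance

-- ===== CLAIM (what is proved, stated in full; the proofs are below) =====
def Claim_equal_mcranges : Prop := ∀ (seq : List (List Int)) (step : Int), Dom_mcranges seq step → Pre_mcranges seq step → Spec_mcranges seq step (mcranges seq step)

-- ===== LEMMAS AND PROOFS =====

-- the three scalars B maintains, expressed over A's group list
def gmin (r : List (List Int)) : Int := (PySem.List.min? (r.map (fun a => pvFirst a)) (fun y => y)).getD 0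
def gmax (r : List (List Int)) : Int := (PySem.List.max? (r.map (fun a => pvLast a)) (fun y => y)).getD 0
def glast (r : List (List Int)) : Int := pvLast ((PySem.List.pyGet? r (-1)).getD [])

theorem mcrange_eq (r : List (List Int)) : mcrange r = [gmin r, gmax r] := rfl

theorem gmin_append (h : List Int) (t : List (List Int)) (x : List Int) :
    gmin ((h :: t) ++ [x]) = min (gmin (h :: t)) (pvFirst x) := by
  simp [gmin, PySem.List.min?_id_cons, List.foldl_map, List.foldl_append]

theorem gmax_append (h : List Int) (t : List (List Int)) (x : List Int) :
    gmax ((h :: t) ++ [x]) = max (gmax (h :: t)) (pvLast x) := by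
  simp [gmax, PySem.List.max?_id_cons, List.foldl_map, List.foldl_append]

theorem glast_append (r : List (List Int)) (x : List Int) :
    glast (r ++ [x]) = pvLast x := by
  simp [glast, PySem.List.pyGet?_neg_one_append_singleton]

theorem gmin_single (x : List Int) : gmin [x] = pvFirst x := by
  simp [gmin, PySem.List.min?_id_cons]

theorem gmax_single (x : List Int) : gmax [x] = pvLast x := by
  simp [gmax, PySem.List.max?_id_cons]

theorem glast_single (x : List Int) : glast [x] = pvLast x := by
  simp [glast, PySem.List.pyGet?, PySem.List.pyIdx?]

theorem loop_eq (step : Int) (rest : List (List Int)) :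
    ∀ (h : List Int) (t : List (List Int)) (out : List (List Int)),
    mcrangesLoop step rest (h :: t) out =
      mcrangesAltLoop step rest true (gmin (h :: t)) (gmax (h :: t)) (glast (h :: t)) out := by
  induction rest with
  | nil =>
    intro h t out
    simp [mcrangesLoop, mcrangesAltLoop, mcrange_eq]
  | cons x rest ih =>
    intro h t out
    by_cases hc : pvFirst x - pvLast ((PySem.List.pyGet? (h :: t) (-1)).getD []) ≤ step
    · have hc' : pvFirst x - glast (h :: t) ≤ step := hc
      rw [mcrangesLoop]
      simp only [List.isEmpty_cons, Bool.false_or, decide_eq_true_eq, hc, if_pos]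
      rw [show (h :: t) ++ [x] = h :: (t ++ [x]) by simp] at *
      rw [ih h (t ++ [x]) out]
      rw [show h :: (t ++ [x]) = (h :: t) ++ [x] by simp, gmin_append, gmax_append, glast_append]
      rw [mcrangesAltLoop]
      simp only [Bool.not_true, Bool.false_eq_true, if_pos hc', reduceIte]
      congr 1
      · by_cases h1 : pvFirst x < gmin (h :: t) <;> simp [min_def, h1] <;> try omega
      · by_cases h1 : gmax (h :: t) < pvLast x <;> simp [max_def, h1] <;> omega
    · have hc' : ¬ pvFirst x - glast (h :: t) ≤ step := hc
      rw [mcrangesLoop]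
      simp only [List.isEmpty_cons, Bool.false_or, decide_eq_true_eq, hc, if_false]
      rw [show ([x] : List (List Int)) = x :: [] from rfl, ih x [] _]
      rw [mcrangesAltLoop]
      simp [hc', gmin_single, gmax_single, glast_single, mcrange_eq]

-- ===== VERDICT (by name: the statement is the Claim_ definition above) =====
theorem mcranges_spec : Claim_equal_mcranges := by
  intro seq step _dom _pre
  unfold Spec_mcranges mcranges mcranges_alt
  cases hs : PySem.List.sorted seq (fun y => y) false with
  | nil => simp [mcrangesLoop, mcrangesAltLoop]
  | cons y ys =>
    rw [mcrangesLoop]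
    simp only [List.isEmpty_nil, Bool.true_or, if_pos, List.nil_append]
    rw [loop_eq, mcrangesAltLoop]
    simp [gmin_single, gmax_single, glast_single]
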